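-- pv_equiv track=rewrite | github.com/levensteins-monster/insertion_transformer | lib/oracle.py | get_optimal_inserts_slow
-- ===== SOURCE A (Python) =====
-- def is_subseq(x, y):
--     """ checks if sequence x is subsequence of sequence y """
--     it = iter(y)
--     return all(c in it for c in x)
--
-- def get_optimal_inserts_slow(cand, ref):
--     """ Slower function used to test get_optimal_inserts """
--     assert is_subseq(cand, ref)
--     inserts = []
--     for i in range(len(cand) + 1):
--         inserts_i = set()
--         for token in set(ref):
--             new_cand = list(cand)
--             new_cand.insert(i, token)
--             if is_subseq(new_cand, ref):
--                 inserts_i.add(token)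
--         inserts.append(inserts_i)
--     return inserts
-- ===== SOURCE B (Python) =====
-- def _left_bounds(cand, ref):
--     """bounds[i] = least j such that cand[:i] is a subsequence of ref[:j] (greedy leftmost alignment)"""
--     bounds = [0]
--     j = 0
--     for c in cand:
--         j += ref[j:].index(c) + 1
--         bounds.append(j)
--     return bounds
--
-- def _bisect_left(ps, x):
--     lo, hi = 0, len(ps)
--     while lo < hi:
--         mid = (lo + hi) // 2
--         if ps[mid] < x:
--             lo = mid + 1
--         else:
--             hi = mid
--     return lo
--
-- def get_optimal_inserts_slow(cand, ref):
--     n, m = len(cand), len(ref)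
--     L = _left_bounds(cand, ref)
--     R = [m - x for x in reversed(_left_bounds(cand[::-1], ref[::-1]))]
--     pos = {t: [k for k in range(m) if ref[k] == t] for t in dict.fromkeys(ref)}
--     out = []
--     for i in range(n + 1):
--         s = set()
--         for t, ps in pos.items():
--             j = _bisect_left(ps, L[i])
--             if j < len(ps) and ps[j] < R[i]:
--                 s.add(t)
--         out.append(s)
--     return out
-- ===== Notes on version B (the rewrite author's own statement) =====
-- stated objective: faster
-- what changed: Instead of inserting every distinct ref token at every gap and re-running the full subsequence check, B computes greedy leftmost/rightmost alignment bounds L[i]/R[i] once, indexes each token's occurrence positions, and declares a token insertable at gap i iff a binary search finds an occurrence p with L[i] <= p < R[i].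
import Mathlib
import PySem

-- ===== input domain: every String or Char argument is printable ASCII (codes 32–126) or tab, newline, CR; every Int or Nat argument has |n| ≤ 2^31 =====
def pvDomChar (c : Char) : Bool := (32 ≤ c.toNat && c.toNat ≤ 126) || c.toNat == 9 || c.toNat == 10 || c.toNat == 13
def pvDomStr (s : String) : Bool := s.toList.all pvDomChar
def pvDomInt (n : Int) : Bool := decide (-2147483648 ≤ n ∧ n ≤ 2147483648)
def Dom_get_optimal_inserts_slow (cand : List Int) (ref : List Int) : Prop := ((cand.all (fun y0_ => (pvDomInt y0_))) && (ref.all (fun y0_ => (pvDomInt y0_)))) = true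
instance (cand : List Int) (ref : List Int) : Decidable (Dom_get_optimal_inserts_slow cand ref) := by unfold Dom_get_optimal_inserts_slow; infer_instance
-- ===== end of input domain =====

-- B replaces A's per-gap, per-token insert-and-recheck by greedy leftmost/rightmost alignment
-- bounds and a token→positions index; a timing run measured it faster.

-- ===== PORT A =====
-- `c in it` on an iterator: consume elements until c is found (dropping c too)
def consumeTo (c : Int) : List Int → Option (List Int)
  | [] => none
  | y :: ys => if y = c then some ys else consumeTo c ys

-- all(c in it for c in x): chain the consumption through the one iterator
def is_subseq : List Int → List Int → Bool
  | [], _ => true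
  | c :: cs, y =>
    match consumeTo c y with
    | none => false
    | some ys => is_subseq cs ys

def get_optimal_inserts_slow (cand : List Int) (ref : List Int) : List (List Int) :=
  (PySem.List.pyRange 0 (PySem.List.len cand + 1) 1).foldl
    (fun inserts i =>
      let inserts_i : PySem.Set Int :=
        (PySem.Set.ofList ref).foldl
          (fun s token =>
            let new_cand := PySem.List.insert cand i token
            if is_subseq new_cand ref then PySem.Set.add s token else s)
          PySem.Set.empty
      inserts ++ [inserts_i])
    []

-- ===== PORT B =====
-- bounds[i] = least j with cand[:i] a subsequence of ref[:j]; `.index` ported via index? with an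
-- out-of-list default (Source B raises ValueError exactly there, which Pre_ excludes)
def leftBounds (cand : List Int) (ref : List Int) : List Nat :=
  (cand.foldl
    (fun (st : List Nat × Nat) c =>
      let rest := ref.drop st.2
      let j := st.2 + (((PySem.List.index? rest c).getD rest.length) + 1)
      (st.1 ++ [j], j))
    ([0], 0)).1

-- the while loop, with `hi - lo` (initially len(ps)) as structural fuel: each pass shrinks hi - lo;
-- `(lo + hi) // 2` on nonnegative ints is exactly Nat division
def bisect_left_go : Nat → List Nat → Nat → Nat → Nat → Nat
  | 0, _, _, lo, _ => lo
  | fuel + 1, ps, x, lo, hi =>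
    if lo < hi then
      let mid := (lo + hi) / 2
      if ps.getD mid 0 < x then bisect_left_go fuel ps x (mid + 1) hi
      else bisect_left_go fuel ps x lo mid
    else lo

def bisect_left (ps : List Nat) (x : Nat) : Nat := bisect_left_go ps.length ps x 0 ps.length

def get_optimal_inserts_slow_alt (cand : List Int) (ref : List Int) : List (List Int) :=
  let n := cand.length
  let m := ref.length
  let L := leftBounds cand ref
  let R := (leftBounds cand.reverse ref.reverse).reverse.map (fun x => m - x)
  let pos : PySem.Dict Int (List Nat) :=
    (PySem.List.dedup ref).foldl
      (fun d t => d.insert t ((List.range m).filter (fun k => ref.getD k 0 == t)))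
      PySem.Dict.empty
  (List.range (n + 1)).map (fun i =>
    pos.items.foldl
      (fun (s : PySem.Set Int) tp =>
        let j := bisect_left tp.2 (L.getD i 0)
        if decide (j < tp.2.length) && decide (tp.2.getD j 0 < R.getD i 0)
        then PySem.Set.add s tp.1 else s)
      PySem.Set.empty)

-- ===== PRECONDITION & SPEC =====
-- A asserts that cand is a subsequence of ref and raises AssertionError otherwise (B's greedy
-- `.index` raises ValueError there too); Pre_ admits exactly the inputs on which A returns.
def Pre_get_optimal_inserts_slow (cand : List Int) (ref : List Int) : Prop := cand.Sublist ref
instance (cand : List Int) (ref : List Int) : Decidable (Pre_get_optimal_inserts_slow cand ref) := by unfold Pre_get_optimal_inserts_slow; infer_instance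

def pvWitness_get_optimal_inserts_slow : List Int × List Int := ([1, 2], [1, 3, 2])

def Spec_get_optimal_inserts_slow (cand : List Int) (ref : List Int) (out : List (List Int)) : Prop := out = get_optimal_inserts_slow_alt cand ref
instance (cand : List Int) (ref : List Int) (out : List (List Int)) : Decidable (Spec_get_optimal_inserts_slow cand ref out) := by unfold Spec_get_optimal_inserts_slow; infer_instance

-- ===== CLAIM (what is proved, stated in full; the proofs are below) =====
def Claim_equal_get_optimal_inserts_slow : Prop := ∀ (cand : List Int) (ref : List Int), Dom_get_optimal_inserts_slow cand ref → Pre_get_optimal_inserts_slow cand ref → Spec_get_optimal_inserts_slow cand ref (get_optimal_inserts_slow cand ref)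

-- ===== LEMMAS AND PROOFS =====

-- recursive form of the greedy leftmost bound: gb x y = least p with x <+ y.take p (when x <+ y)
def gb : List Int → List Int → Nat
  | [], _ => 0
  | c :: cs, y =>
    let a := ((PySem.List.index? y c).getD y.length) + 1
    a + gb cs (y.drop a)

-- the fold in leftBounds records the greedy bound of every prefix of cand
theorem leftBounds_foldl (ref : List Int) :
    ∀ (cs : List Int) (acc : List Nat) (j : Nat),
      (cs.foldl
        (fun (st : List Nat × Nat) c =>
          let rest := ref.drop st.2
          let j := st.2 + (((PySem.List.index? rest c).getD rest.length) + 1)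
          (st.1 ++ [j], j))
        (acc, j)).1
      = acc ++ (List.range cs.length).map (fun k => j + gb (cs.take (k + 1)) (ref.drop j)) := by
  intro cs
  induction cs with
  | nil => intro acc j; simp
  | cons c cs ih =>
    intro acc j
    simp only [List.foldl_cons, List.length_cons]
    rw [ih]
    rw [List.range_succ_eq_map]
    simp only [List.map_cons, List.map_map]
    rw [List.append_assoc]
    congr 1
    rw [List.singleton_append]
    congr 1
    apply List.map_congr_left
    intro k _
    simp only [Function.comp_apply, List.take_succ_cons, gb]
    simp only [List.drop_drop, Nat.succ_eq_add_one]
    omega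

theorem leftBounds_eq (cand ref : List Int) :
    leftBounds cand ref = 0 :: (List.range cand.length).map (fun k => gb (cand.take (k + 1)) ref) := by
  unfold leftBounds
  rw [leftBounds_foldl]
  simp

theorem leftBounds_length (cand ref : List Int) :
    (leftBounds cand ref).length = cand.length + 1 := by
  simp [leftBounds_eq]

theorem leftBounds_getD (cand ref : List Int) {i : Nat} (hi : i ≤ cand.length) :
    (leftBounds cand ref).getD i 0 = gb (cand.take i) ref := by
  rw [leftBounds_eq]
  cases i with
  | zero => simp [gb]
  | succ k =>
    have hk : k < cand.length := by omega
    simp [List.getD, List.getElem?_map, List.getElem?_range hk]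

theorem consumeTo_eq (c : Int) (y : List Int) :
    consumeTo c y = (PySem.List.index? y c).map (fun k => y.drop (k + 1)) := by
  induction y with
  | nil => simp [consumeTo, PySem.List.index?]
  | cons b ys ih =>
    by_cases hb : b = c
    · subst hb
      rw [consumeTo, if_pos rfl, PySem.List.index?_cons_self]
      simp
    · rw [consumeTo, if_neg hb, PySem.List.index?_cons_of_ne _ hb, ih]
      cases h : PySem.List.index? ys c <;> simp

theorem sublist_cons_first (c : Int) (cs y : List Int) (h : (c :: cs).Sublist y) :
    ∃ k, PySem.List.index? y c = some k ∧ cs.Sublist (y.drop (k + 1)) := by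
  induction y generalizing cs with
  | nil => simp at h
  | cons b ys ih =>
    by_cases hb : b = c
    · subst hb
      refine ⟨0, PySem.List.index?_cons_self _ _, ?_⟩
      have hcs : cs.Sublist ys := by
        cases h with
        | cons _ h2 => exact (List.sublist_cons_self _ cs).trans h2
        | cons₂ _ h2 => exact h2
      simpa using hcs
    · have h' : (c :: cs).Sublist ys := by
        cases h with
        | cons _ h2 => exact h2
        | cons₂ => exact absurd rfl hb
      obtain ⟨k, hk, hs⟩ := ih cs h'
      refine ⟨k + 1, ?_, ?_⟩
      · rw [PySem.List.index?_cons_of_ne _ hb, hk]; rfl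
      · simpa using hs

theorem sublist_of_index (c : Int) (cs y : List Int) {k : Nat}
    (hk : PySem.List.index? y c = some k) (h : cs.Sublist (y.drop (k + 1))) :
    (c :: cs).Sublist y := by
  obtain ⟨hlt, hget, _⟩ := PySem.List.getElem_of_index?_eq_some hk
  have hy : y = y.take k ++ c :: y.drop (k + 1) := by
    conv_lhs => rw [← List.take_append_drop k y]
    congr 1
    rw [List.drop_eq_getElem_cons hlt, hget]
  rw [hy]
  exact (List.cons_sublist_cons.mpr h).trans (List.sublist_append_right _ _)

theorem is_subseq_iff (x y : List Int) : is_subseq x y = true ↔ x.Sublist y := by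
  induction x generalizing y with
  | nil => simp [is_subseq]
  | cons c cs ih =>
    rw [is_subseq, consumeTo_eq]
    cases hidx : PySem.List.index? y c with
    | none =>
      simp only [Option.map_none]
      constructor
      · intro h; exact absurd h (by simp)
      · intro h
        obtain ⟨k, hk, _⟩ := sublist_cons_first c cs y h
        rw [hidx] at hk; cases hk
    | some k =>
      simp only [Option.map_some]
      rw [ih]
      constructor
      · intro h; exact sublist_of_index c cs y hidx h
      · intro h
        obtain ⟨k', hk', hs⟩ := sublist_cons_first c cs y h
        rw [hidx] at hk'; cases hk'; exact hs

theorem gb_spec (x : List Int) : ∀ (y : List Int), x.Sublist y →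
    x.Sublist (y.take (gb x y)) ∧ gb x y ≤ y.length := by
  induction x with
  | nil => intro y _; simp [gb]
  | cons c cs ih =>
    intro y h
    obtain ⟨k, hk, hcs⟩ := sublist_cons_first c cs y h
    obtain ⟨hlt, hget, _⟩ := PySem.List.getElem_of_index?_eq_some hk
    obtain ⟨ih1, ih2⟩ := ih (y.drop (k + 1)) hcs
    have hk' : List.idxOf? c y = some k := by simpa using hk
    have hgb : gb (c :: cs) y = (k + 1) + gb cs (y.drop (k + 1)) := by
      simp [gb, hk']
    constructor
    · rw [hgb, List.take_add]
      have hy : y.take (k + 1) = y.take k ++ [c] := by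
        rw [List.take_add_one, List.getElem?_eq_getElem hlt, hget]; rfl
      rw [hy]
      have h1 : [c].Sublist (y.take k ++ [c]) := List.sublist_append_right _ _
      simpa using List.Sublist.append h1 ih1
    · rw [hgb]
      have : (y.drop (k + 1)).length = y.length - (k + 1) := by simp
      omega

theorem gb_min (x : List Int) : ∀ (y : List Int) (p : Nat), x.Sublist (y.take p) → gb x y ≤ p := by
  induction x with
  | nil => intro y p _; simp [gb]
  | cons c cs ih =>
    intro y p h
    obtain ⟨k, hk, hcs⟩ := sublist_cons_first c cs (y.take p) h
    obtain ⟨hlt, hget, _⟩ := PySem.List.getElem_of_index?_eq_some hk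
    have hmem : c ∈ y.take p := List.mem_of_getElem hget
    have hky : List.idxOf? c y = some k := by
      have h2 : PySem.List.index? y c = some k := by
        conv_lhs => rw [← List.take_append_drop p y]
        rw [PySem.List.index?_append_of_mem _ hmem]
        exact hk
      simpa using h2
    have hlen : (y.take p).length ≤ p := by simp
    have hkp : k + 1 ≤ p := by omega
    have hdrop : (y.take p).drop (k + 1) = (y.drop (k + 1)).take (p - (k + 1)) := by
      rw [List.drop_take]
    rw [hdrop] at hcs
    have := ih (y.drop (k + 1)) (p - (k + 1)) hcs
    simp only [gb]
    rw [PySem.List.index?_eq_idxOf?, hky]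
    simp only [Option.getD_some]
    omega

theorem take_sublist_iff_gb (x y : List Int) (h : x.Sublist y) (p : Nat) :
    x.Sublist (y.take p) ↔ gb x y ≤ p := by
  constructor
  · exact gb_min x y p
  · intro hle
    obtain ⟨h1, _⟩ := gb_spec x y h
    refine h1.trans ?_
    have : y.take (gb x y) = (y.take p).take (gb x y) := by
      rw [List.take_take, Nat.min_eq_left hle]
    rw [this]
    exact (y.take p).take_sublist _

theorem insert_sublist_iff (cand ref : List Int) (i : Nat) (t : Int) :
    (cand.take i ++ t :: cand.drop i).Sublist ref ↔
      ∃ k, k < ref.length ∧ ref.getD k 0 = t ∧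
        (cand.take i).Sublist (ref.take k) ∧ (cand.drop i).Sublist (ref.drop (k + 1)) := by
  constructor
  · intro h
    obtain ⟨r₁, r₂, hsplit, h1, h2⟩ := List.append_sublist_iff.mp h
    obtain ⟨k₂, hk₂, hs⟩ := sublist_cons_first t _ r₂ h2
    obtain ⟨hlt₂, hget₂, _⟩ := PySem.List.getElem_of_index?_eq_some hk₂
    refine ⟨r₁.length + k₂, ?_, ?_, ?_, ?_⟩
    · subst hsplit; simp; omega
    · subst hsplit
      rw [List.getD_eq_getElem _ _ (by simp; omega)]
      rw [List.getElem_append_right (by omega)]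
      simpa using hget₂
    · refine h1.trans ?_
      have h3 : r₁ = (ref.take (r₁.length + k₂)).take r₁.length := by
        rw [List.take_take, Nat.min_eq_left (by omega), hsplit]
        simp
      conv_lhs => rw [h3]
      exact List.take_sublist _ _
    · have : ref.drop (r₁.length + k₂ + 1) = r₂.drop (k₂ + 1) := by
        subst hsplit
        rw [List.drop_append]
        rw [List.drop_eq_nil_of_le (by omega)]
        simp
        omega
      rw [this]
      exact hs
  · rintro ⟨k, hk, hget, h1, h2⟩
    have hy : ref = ref.take k ++ t :: ref.drop (k + 1) := by
      conv_lhs => rw [← List.take_append_drop k ref]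
      congr 1
      rw [List.drop_eq_getElem_cons hk]
      congr 1
      rw [← hget, List.getD_eq_getElem _ _ hk]
    rw [hy]
    exact List.Sublist.append h1 (List.cons_sublist_cons.mpr h2)

theorem drop_sublist_iff (cand ref : List Int) (h : cand.Sublist ref) {i s : Nat}
    (hs : s ≤ ref.length) :
    (cand.drop i).Sublist (ref.drop s) ↔
      s ≤ ref.length - gb (cand.reverse.take (cand.length - i)) ref.reverse := by
  have hrev : (cand.drop i).Sublist (ref.drop s) ↔
      (cand.reverse.take (cand.length - i)).Sublist (ref.reverse.take (ref.length - s)) := by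
    rw [← List.reverse_sublist, List.reverse_drop, List.reverse_drop]
  have hsub : (cand.reverse.take (cand.length - i)).Sublist ref.reverse := by
    rw [← List.reverse_drop]
    exact List.reverse_sublist.mpr ((List.drop_sublist i cand).trans h)
  rw [hrev, take_sublist_iff_gb _ _ hsub]
  have hle : gb (cand.reverse.take (cand.length - i)) ref.reverse ≤ ref.length := by
    have := (gb_spec _ _ hsub).2
    simpa using this
  omega

theorem foldl_add_if_filter (p : Int → Bool) :
    ∀ (l : List Int) (s0 : PySem.Set Int), l.Nodup → (∀ t ∈ l, t ∉ s0) →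
      l.foldl (fun (s : PySem.Set Int) t => if p t then PySem.Set.add s t else s) s0
        = s0 ++ l.filter p := by
  intro l
  induction l with
  | nil => intro s0 _ _; simp
  | cons c cs ih =>
    intro s0 hnd hfresh
    simp only [List.foldl_cons, List.filter_cons]
    by_cases hp : p c
    · rw [if_pos hp, if_pos hp]
      rw [PySem.Set.add_of_not_mem (hfresh c (by simp))]
      rw [ih (s0 ++ [c]) hnd.of_cons]
      · simp
      · intro t ht
        simp only [List.mem_append, List.mem_singleton]
        rintro (h1 | rfl)
        · exact hfresh t (by simp [ht]) h1
        · exact (List.nodup_cons.mp hnd).1 ht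
    · rw [if_neg hp, if_neg hp]
      exact ih s0 hnd.of_cons (fun t ht => hfresh t (by simp [ht]))

theorem bisect_go_spec (ps : List Nat) (x : Nat)
    (hmono : ∀ (a b : Nat) (_ : a < ps.length) (hb : b < ps.length), a ≤ b → ps[a]'(by omega) ≤ ps[b]) :
    ∀ (d lo hi : Nat), hi - lo ≤ d → lo ≤ hi → hi ≤ ps.length →
      (∀ (idx : Nat) (_ : idx < ps.length), idx < lo → ps[idx] < x) →
      (∀ (idx : Nat) (_ : idx < ps.length), hi ≤ idx → x ≤ ps[idx]) →
      lo ≤ bisect_left_go d ps x lo hi ∧ bisect_left_go d ps x lo hi ≤ hi ∧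
      (∀ (idx : Nat) (_ : idx < ps.length), idx < bisect_left_go d ps x lo hi → ps[idx] < x) ∧
      (∀ (idx : Nat) (_ : idx < ps.length), bisect_left_go d ps x lo hi ≤ idx → x ≤ ps[idx]) := by
  intro d
  induction d with
  | zero =>
    intro lo hi hd hle hlen hbelow habove
    rw [bisect_left_go]
    refine ⟨le_refl _, hle, ?_, ?_⟩
    · intro idx hidx hlt; exact hbelow idx hidx hlt
    · intro idx hidx hge
      by_cases hhi : hi ≤ idx
      · exact habove idx hidx hhi
      · exact habove idx hidx (by omega)
  | succ d ih =>
    intro lo hi hd hle hlen hbelow habove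
    rw [bisect_left_go]
    by_cases hlt : lo < hi
    · rw [if_pos hlt]
      have hmid : (lo + hi) / 2 < hi := by omega
      have hmidlo : lo ≤ (lo + hi) / 2 := by omega
      have hmidlen : (lo + hi) / 2 < ps.length := by omega
      have hgetD : ps.getD ((lo + hi) / 2) 0 = ps[(lo + hi) / 2] := by
        rw [List.getD_eq_getElem _ _ hmidlen]
      by_cases hcmp : ps.getD ((lo + hi) / 2) 0 < x
      · rw [if_pos hcmp]
        refine ?_
        have := ih ((lo + hi) / 2 + 1) hi (by omega) (by omega) hlen
          (fun idx hidx hlt' => by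
            have : ps[idx] ≤ ps[(lo + hi) / 2] := hmono idx _ hidx hmidlen (by omega)
            rw [hgetD] at hcmp
            omega)
          habove
        exact ⟨by omega, this.2.1, this.2.2.1, this.2.2.2⟩
      · rw [if_neg hcmp]
        have := ih lo ((lo + hi) / 2) (by omega) (by omega) (by omega) hbelow
          (fun idx hidx hge => by
            have : ps[(lo + hi) / 2] ≤ ps[idx] := hmono _ idx hmidlen hidx hge
            rw [hgetD] at hcmp
            omega)
        exact ⟨this.1, by omega, this.2.2.1, this.2.2.2⟩
    · rw [if_neg hlt]
      refine ⟨le_refl _, hle, ?_, ?_⟩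
      · intro idx hidx hlt'; exact hbelow idx hidx hlt'
      · intro idx hidx hge
        by_cases hhi : hi ≤ idx
        · exact habove idx hidx hhi
        · exact habove idx hidx (by omega)

-- the window test via binary search finds an element in [x, r) iff one exists
theorem bisect_window {ps : List Nat} {x r : Nat}
    (hmono : ∀ (a b : Nat) (_ : a < ps.length) (hb : b < ps.length), a ≤ b → ps[a]'(by omega) ≤ ps[b]) :
    (bisect_left ps x < ps.length ∧ ps.getD (bisect_left ps x) 0 < r) ↔
      ∃ p ∈ ps, x ≤ p ∧ p < r := by
  have hspec := bisect_go_spec ps x hmono ps.length 0 ps.length (by omega) (by omega) (le_refl _)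
    (fun idx _ h => by omega) (fun idx hidx h => by omega)
  obtain ⟨-, hble, hbelow, habove⟩ := hspec
  unfold bisect_left
  constructor
  · rintro ⟨hlt, hval⟩
    rw [List.getD_eq_getElem _ _ hlt] at hval
    exact ⟨ps[bisect_left_go ps.length ps x 0 ps.length], List.getElem_mem _, habove _ hlt (le_refl _), hval⟩
  · rintro ⟨p, hp, hxp, hpr⟩
    obtain ⟨idx, hidx, rfl⟩ := List.mem_iff_getElem.mp hp
    have hge : bisect_left_go ps.length ps x 0 ps.length ≤ idx := by
      by_contra hlt
      have := hbelow idx hidx (by omega)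
      omega
    have hlt : bisect_left_go ps.length ps x 0 ps.length < ps.length := by omega
    refine ⟨hlt, ?_⟩
    rw [List.getD_eq_getElem _ _ hlt]
    have := hmono _ idx hlt hidx hge
    omega

-- occurrence positions, as B builds them, are strictly increasing
theorem filter_range_mono (ref : List Int) (t : Int) :
    ∀ (a b : Nat) (_ : a < ((List.range ref.length).filter (fun j => ref.getD j 0 == t)).length)
      (hb : b < ((List.range ref.length).filter (fun j => ref.getD j 0 == t)).length), a ≤ b →
      ((List.range ref.length).filter (fun j => ref.getD j 0 == t))[a]'(by omega)
        ≤ ((List.range ref.length).filter (fun j => ref.getD j 0 == t))[b] := by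
  intro a b ha hb hab
  have hpw : ((List.range ref.length).filter (fun j => ref.getD j 0 == t)).Pairwise (· < ·) :=
    (List.pairwise_lt_range).filter _
  rcases Nat.lt_or_ge a b with hlt | hge
  · exact le_of_lt (List.pairwise_iff_getElem.mp hpw a b ha hb hlt)
  · have : a = b := by omega
    subst this; exact le_refl _

theorem main_eq (cand ref : List Int) (h : cand.Sublist ref) :
    get_optimal_inserts_slow cand ref = get_optimal_inserts_slow_alt cand ref := by
  have hr : PySem.List.pyRange 0 (PySem.List.len cand + 1) 1
      = (List.range (cand.length + 1)).map (fun (k : Nat) => (k : Int)) := by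
    rw [PySem.List.len_eq,
      show ((cand.length : Int) + 1) = ((cand.length + 1 : Nat) : Int) from by push_cast; ring]
    exact PySem.List.pyRange_zero_nat _
  have hA : get_optimal_inserts_slow cand ref
      = (List.range (cand.length + 1)).map (fun (k : Nat) =>
          (PySem.Set.ofList ref).foldl
            (fun (s : PySem.Set Int) token =>
              if is_subseq (PySem.List.insert cand (k : Int) token) ref
              then PySem.Set.add s token else s)
            PySem.Set.empty) := by
    show (PySem.List.pyRange 0 (PySem.List.len cand + 1) 1).foldl
        (fun (inserts : List (List Int)) (i : Int) =>
          inserts ++ [(PySem.Set.ofList ref).foldl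
            (fun (s : PySem.Set Int) token =>
              if is_subseq (PySem.List.insert cand i token) ref
              then PySem.Set.add s token else s)
            PySem.Set.empty])
        [] = _
    rw [hr, List.foldl_map]
    rw [PySem.List.foldl_append_singleton_eq_map
      (f := fun (k : Nat) =>
        (PySem.Set.ofList ref).foldl
          (fun (s : PySem.Set Int) token =>
            if is_subseq (PySem.List.insert cand (k : Int) token) ref
            then PySem.Set.add s token else s)
          PySem.Set.empty)]
    rw [List.nil_append]
  have hB : get_optimal_inserts_slow_alt cand ref
      = (List.range (cand.length + 1)).map (fun (i : Nat) =>
          ((PySem.List.dedup ref).foldl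
            (fun (d : PySem.Dict Int (List Nat)) t =>
              d.insert t ((List.range ref.length).filter (fun j => ref.getD j 0 == t)))
            PySem.Dict.empty).items.foldl
            (fun (s : PySem.Set Int) tp =>
              if decide (bisect_left tp.2 ((leftBounds cand ref).getD i 0) < tp.2.length) &&
                  decide (tp.2.getD (bisect_left tp.2 ((leftBounds cand ref).getD i 0)) 0 <
                    ((leftBounds cand.reverse ref.reverse).reverse.map
                      (fun x => ref.length - x)).getD i 0)
              then PySem.Set.add s tp.1 else s)
            PySem.Set.empty) := rfl
  rw [hA, hB]
  apply List.map_congr_left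
  intro k hk
  have hkn : k ≤ cand.length := by
    rw [List.mem_range] at hk; omega
  have hitems : ((PySem.List.dedup ref).foldl
      (fun (d : PySem.Dict Int (List Nat)) t =>
        d.insert t ((List.range ref.length).filter (fun j => ref.getD j 0 == t)))
      PySem.Dict.empty).items
      = (PySem.List.dedup ref).map
          (fun t => (t, (List.range ref.length).filter (fun j => ref.getD j 0 == t))) := by
    have := PySem.Dict.items_foldl_insert_fresh (l := PySem.List.dedup ref)
      (k := fun t => t)
      (v := fun t => (List.range ref.length).filter (fun j => ref.getD j 0 == t))
      (d := PySem.Dict.empty) (by intro a _; simp) (by simp)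
    simpa using this
  rw [hitems, List.foldl_map]
  have hsubk : (cand.take k).Sublist ref := (List.take_sublist k cand).trans h
  have hL : (leftBounds cand ref).getD k 0 = gb (cand.take k) ref := leftBounds_getD _ _ hkn
  have hlenr : (leftBounds cand.reverse ref.reverse).length = cand.length + 1 := by
    rw [leftBounds_length]; simp
  have hR : ((leftBounds cand.reverse ref.reverse).reverse.map (fun x => ref.length - x)).getD k 0
      = ref.length - gb (cand.reverse.take (cand.length - k)) ref.reverse := by
    rw [List.getD_eq_getElem _ _ (by simp only [List.length_map, List.length_reverse, hlenr]; omega)]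
    rw [List.getElem_map, List.getElem_reverse]
    have : (leftBounds cand.reverse ref.reverse)[(leftBounds cand.reverse ref.reverse).length - 1 - k]
        = (leftBounds cand.reverse ref.reverse).getD (cand.length - k) 0 := by
      rw [List.getD_eq_getElem _ _ (by omega)]
      congr 1
      omega
    rw [this, leftBounds_getD _ _ (by simp only [List.length_reverse]; omega)]
  set pA : Int → Bool := fun token => is_subseq (PySem.List.insert cand (k : Int) token) ref with hpA
  set pB : Int → Bool := fun t =>
    decide (bisect_left ((List.range ref.length).filter (fun j => ref.getD j 0 == t))
        ((leftBounds cand ref).getD k 0)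
      < ((List.range ref.length).filter (fun j => ref.getD j 0 == t)).length) &&
    decide (((List.range ref.length).filter (fun j => ref.getD j 0 == t)).getD
        (bisect_left ((List.range ref.length).filter (fun j => ref.getD j 0 == t))
          ((leftBounds cand ref).getD k 0)) 0
      < ((leftBounds cand.reverse ref.reverse).reverse.map
          (fun x => ref.length - x)).getD k 0) with hpB
  have key : ∀ t ∈ PySem.Set.ofList ref, pA t = pB t := by
    intro t _
    have hiff : (pA t = true) ↔ (pB t = true) := by
      rw [hpA, hpB]
      simp only [PySem.List.insert_natCast cand k t hkn, is_subseq_iff]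
      rw [insert_sublist_iff]
      rw [Bool.and_eq_true, decide_eq_true_eq, decide_eq_true_eq]
      rw [bisect_window (filter_range_mono ref t)]
      rw [hL, hR]
      constructor
      · rintro ⟨j, hj, hget, h1, h2⟩
        refine ⟨j, ?_, ?_, ?_⟩
        · rw [List.mem_filter, List.mem_range]
          exact ⟨hj, by simpa using hget⟩
        · exact (take_sublist_iff_gb _ _ hsubk j).mp h1
        · have c2 : j + 1 ≤ ref.length - gb (cand.reverse.take (cand.length - k)) ref.reverse :=
            (drop_sublist_iff cand ref h (by omega)).mp h2
          omega
      · rintro ⟨j, hjmem, hc1, hc2⟩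
        rw [List.mem_filter, List.mem_range] at hjmem
        obtain ⟨hj, hget⟩ := hjmem
        refine ⟨j, hj, by simpa using hget, ?_, ?_⟩
        · exact (take_sublist_iff_gb _ _ hsubk j).mpr hc1
        · exact (drop_sublist_iff cand ref h (by omega)).mpr (by omega)
    exact Bool.eq_iff_iff.mpr hiff
  have hfresh : ∀ t ∈ PySem.Set.ofList ref, t ∉ (PySem.Set.empty : PySem.Set Int) := by
    intro t _ ht; simp [PySem.Set.empty] at ht
  calc (PySem.Set.ofList ref).foldl
        (fun (s : PySem.Set Int) token => if pA token then PySem.Set.add s token else s)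
        PySem.Set.empty
      = PySem.Set.empty ++ (PySem.Set.ofList ref).filter pA :=
        foldl_add_if_filter pA _ _ (PySem.Set.nodup_ofList ref) hfresh
    _ = PySem.Set.empty ++ (PySem.Set.ofList ref).filter pB := by
        rw [List.filter_congr key]
    _ = (PySem.List.dedup ref).foldl
        (fun (s : PySem.Set Int) t => if pB t then PySem.Set.add s t else s)
        PySem.Set.empty := by
        rw [PySem.List.dedup_eq_ofList]
        exact (foldl_add_if_filter pB _ _ (PySem.Set.nodup_ofList ref) hfresh).symm

-- ===== VERDICT (by name: the statement is the Claim_ definition above) =====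
theorem get_optimal_inserts_slow_spec : Claim_equal_get_optimal_inserts_slow := by
  intro cand ref _ hpre
  exact main_eq cand ref hpre
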